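-- pv_equiv track=rewrite | github.com/pypi-data/pypi-mirror-403 | packages/dittomation/dittomation-1.0.0.tar.gz/dittomation-1.0.0/recorder/interactive_recorder.py | _find_element_by_text_or_id
-- ===== SOURCE A (Python) =====
-- from typing import Any, Dict, List, Optional, Tuple
--
-- def _find_element_by_text_or_id(elements: List[Dict], search: str) -> Optional[Dict]:
--     """Find element by text, content-desc, or resource-id."""
--     search_lower = search.lower()
--
--     # Try exact matches first
--     for elem in elements:
--         if elem.get("text", "").lower() == search_lower:
--             return elem
--         if elem.get("content_desc", "").lower() == search_lower:
--             return elem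
--         rid = elem.get("resource_id", "").split("/")[-1].lower()
--         if rid == search_lower:
--             return elem
--
--     # Try partial matches
--     for elem in elements:
--         if search_lower in elem.get("text", "").lower():
--             return elem
--         if search_lower in elem.get("content_desc", "").lower():
--             return elem
--         rid = elem.get("resource_id", "").split("/")[-1].lower()
--         if search_lower in rid:
--             return elem
--
--     return None
-- ===== SOURCE B (Python) =====
-- def _find_element_by_text_or_id(elements, search):
--     """Single pass: return the first exact match immediately; remember the
--     first partial match as a fallback and return it after the scan."""
--     s = search.lower()
--     fallback = None
--     for elem in elements:
--         text = elem.get("text", "").lower()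
--         desc = elem.get("content_desc", "").lower()
--         rid = elem.get("resource_id", "").split("/")[-1].lower()
--         if s in (text, desc, rid):
--             return elem
--         if fallback is None and (s in text or s in desc or s in rid):
--             fallback = elem
--     return fallback
-- ===== Notes on version B (the rewrite author's own statement) =====
-- stated objective: alternative
-- what changed: Replaces A's two sequential scans (exact pass, then partial pass) with a single scan that returns an exact match immediately and caches the first partial match as a fallback.
import Mathlib
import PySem

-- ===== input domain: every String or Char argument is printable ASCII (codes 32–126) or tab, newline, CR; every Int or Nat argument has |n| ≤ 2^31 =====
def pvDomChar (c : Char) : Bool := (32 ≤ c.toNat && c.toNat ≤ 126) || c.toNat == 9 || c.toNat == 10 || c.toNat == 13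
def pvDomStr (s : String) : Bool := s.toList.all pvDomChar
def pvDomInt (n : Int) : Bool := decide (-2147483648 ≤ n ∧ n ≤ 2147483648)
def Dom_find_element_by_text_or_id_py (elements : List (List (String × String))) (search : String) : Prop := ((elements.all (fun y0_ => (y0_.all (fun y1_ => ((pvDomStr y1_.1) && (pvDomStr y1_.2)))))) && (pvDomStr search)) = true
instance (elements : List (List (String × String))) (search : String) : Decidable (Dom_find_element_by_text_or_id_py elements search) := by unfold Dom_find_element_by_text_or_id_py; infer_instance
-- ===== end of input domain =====

-- B replaces A's two sequential scans with one scan caching the first partial match (alternative decomposition; return value proved equal).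


-- ===== PORT A =====
def pvRidA (elem : List (String × String)) : String :=
  PySem.Str.lower (PySem.List.pyGetD (((PySem.Str.split? ((PySem.Dict.mk elem).getD "resource_id" "") "/").getD [])) (-1) "")

def pvExactA (elem : List (String × String)) (sl : String) : Bool :=
  PySem.Str.lower ((PySem.Dict.mk elem).getD "text" "") == sl
  || PySem.Str.lower ((PySem.Dict.mk elem).getD "content_desc" "") == sl
  || pvRidA elem == sl

def pvPartialA (elem : List (String × String)) (sl : String) : Bool :=
  PySem.Str.isIn sl (PySem.Str.lower ((PySem.Dict.mk elem).getD "text" ""))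
  || PySem.Str.isIn sl (PySem.Str.lower ((PySem.Dict.mk elem).getD "content_desc" ""))
  || PySem.Str.isIn sl (pvRidA elem)

-- A: first loop returns the first exact match; second loop the first partial match.
def find_element_by_text_or_id_py (elements : List (List (String × String))) (search : String) : Option (List (String × String)) :=
  let sl := PySem.Str.lower search
  match elements.find? (fun e => pvExactA e sl) with
  | some e => some e
  | none => elements.find? (fun e => pvPartialA e sl)

-- ===== PORT B =====
def pvFieldsB (elem : List (String × String)) : String × String × String :=
  (PySem.Str.lower ((PySem.Dict.mk elem).getD "text" ""),
   PySem.Str.lower ((PySem.Dict.mk elem).getD "content_desc" ""),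
   PySem.Str.lower (PySem.List.pyGetD (((PySem.Str.split? ((PySem.Dict.mk elem).getD "resource_id" "") "/").getD [])) (-1) ""))

-- B: one pass; an exact match returns at once, the first partial match is cached in `fallback`.
def pvLoopB (sl : String) (fallback : Option (List (String × String))) :
    List (List (String × String)) → Option (List (String × String))
  | [] => fallback
  | e :: rest =>
    let (t, d, r) := pvFieldsB e
    if sl == t || sl == d || sl == r then some e
    else pvLoopB sl
      (if fallback.isNone && (PySem.Str.isIn sl t || PySem.Str.isIn sl d || PySem.Str.isIn sl r)
       then some e else fallback) rest

def find_element_by_text_or_id_py_alt (elements : List (List (String × String))) (search : String) : Option (List (String × String)) :=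
  pvLoopB (PySem.Str.lower search) none elements

-- ===== PRECONDITION & SPEC =====
def Spec_find_element_by_text_or_id_py (elements : List (List (String × String))) (search : String) (out : Option (List (String × String))) : Prop := out = find_element_by_text_or_id_py_alt elements search
instance (elements : List (List (String × String))) (search : String) (out : Option (List (String × String))) : Decidable (Spec_find_element_by_text_or_id_py elements search out) := by unfold Spec_find_element_by_text_or_id_py; infer_instance

-- ===== CLAIM (what is proved, stated in full; the proofs are below) =====
def Claim_equal_find_element_by_text_or_id_py : Prop := ∀ (elements : List (List (String × String))) (search : String), Dom_find_element_by_text_or_id_py elements search → Spec_find_element_by_text_or_id_py elements search (find_element_by_text_or_id_py elements search)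

-- ===== LEMMAS AND PROOFS =====
lemma pvExactA_eq (e : List (String × String)) (sl : String) :
    pvExactA e sl = (sl == (pvFieldsB e).1 || sl == (pvFieldsB e).2.1 || sl == (pvFieldsB e).2.2) := by
  simp [pvExactA, pvFieldsB, pvRidA, BEq.comm]

lemma pvPartialA_eq (e : List (String × String)) (sl : String) :
    pvPartialA e sl
      = (PySem.Str.isIn sl (pvFieldsB e).1 || PySem.Str.isIn sl (pvFieldsB e).2.1
         || PySem.Str.isIn sl (pvFieldsB e).2.2) := by
  simp [pvPartialA, pvFieldsB, pvRidA]

lemma pvLoopB_eq (sl : String) (fb : Option (List (String × String)))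
    (xs : List (List (String × String))) :
    pvLoopB sl fb xs
      = match xs.find? (fun e => pvExactA e sl) with
        | some e => some e
        | none => fb.or (xs.find? (fun e => pvPartialA e sl)) := by
  induction xs generalizing fb with
  | nil => cases fb <;> simp [pvLoopB]
  | cons e rest ih =>
    rcases hfe : pvFieldsB e with ⟨t, d, r⟩
    have hex : pvExactA e sl = (sl == t || sl == d || sl == r) := by rw [pvExactA_eq, hfe]
    have hpar : pvPartialA e sl
        = (PySem.Str.isIn sl t || PySem.Str.isIn sl d || PySem.Str.isIn sl r) := by
      rw [pvPartialA_eq, hfe]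
    rw [pvLoopB, hfe]
    by_cases hx : (sl == t || sl == d || sl == r) = true
    · simp [hex, hx]
    · have hx0 : (sl == t || sl == d || sl == r) = false := by simpa using hx
      simp only [hx0, Bool.false_eq_true, if_false, ih]
      cases fb with
      | none =>
        cases hfind : rest.find? (fun e => pvExactA e sl) with
        | some e' => simp [List.find?_cons, hex, hfind, hx0]
        | none =>
          rw [show (PySem.Str.isIn sl t || PySem.Str.isIn sl d || PySem.Str.isIn sl r)
                = pvPartialA e sl from hpar.symm]
          simp only [List.find?_cons, hex, hfind, hx0]
          by_cases hp : pvPartialA e sl = true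
          · simp [hp]
          · have hp0 : pvPartialA e sl = false := by simpa using hp
            simp [hp0]
      | some f =>
        cases hfind : rest.find? (fun e => pvExactA e sl) with
        | some e' => simp [List.find?_cons, hex, hfind, hx0]
        | none =>
          simp only [List.find?_cons, hex, hfind, hx0]
          simp

-- ===== VERDICT (by name: the statement is the Claim_ definition above) =====
theorem find_element_by_text_or_id_py_spec : Claim_equal_find_element_by_text_or_id_py := by
  intro elements search _
  unfold Spec_find_element_by_text_or_id_py
  unfold find_element_by_text_or_id_py find_element_by_text_or_id_py_alt
  rw [pvLoopB_eq]
  cases h : elements.find? (fun e => pvExactA e (PySem.Str.lower search)) <;> simp [h]
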